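-- pv_equiv track=rewrite | github.com/sueszli/vector-database-benchmark | dataset/python-mutated/_twenty_newsgroups.py | strip_newsgroup_footer
-- ===== SOURCE A (Python) =====
-- def strip_newsgroup_footer(text):
--     if False:
--         i = 10
--         return i + 15
--     '\n    Given text in "news" format, attempt to remove a signature block.\n\n    As a rough heuristic, we assume that signatures are set apart by either\n    a blank line or a line made of hyphens, and that it is the last such line\n    in the file (disregarding blank lines at the end).\n\n    Parameters\n    ----------\n    text : str\n        The text from which to remove the signature block.\n    '
--     lines = text.strip().split('\n')
--     for line_num in range(len(lines) - 1, -1, -1):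
--         line = lines[line_num]
--         if line.strip().strip('-') == '':
--             break
--     if line_num > 0:
--         return '\n'.join(lines[:line_num])
--     else:
--         return text
-- ===== SOURCE B (Python) =====
-- def strip_newsgroup_footer(text):
--     lines = text.strip().split('\n')
--     last_sep = 0
--     for i, line in enumerate(lines):
--         if line.strip().strip('-') == '':
--             last_sep = i
--     if last_sep > 0:
--         return '\n'.join(lines[:last_sep])
--     else:
--         return text
-- ===== Notes on version B (the rewrite author's own statement) =====
-- stated objective: idiomatic
-- what changed: Replaces A's backward index scan with break (plus a fall-through on the leftover loop variable) by a single forward enumerate pass that accumulates the last separator index, defaulting to 0.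
import Mathlib
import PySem

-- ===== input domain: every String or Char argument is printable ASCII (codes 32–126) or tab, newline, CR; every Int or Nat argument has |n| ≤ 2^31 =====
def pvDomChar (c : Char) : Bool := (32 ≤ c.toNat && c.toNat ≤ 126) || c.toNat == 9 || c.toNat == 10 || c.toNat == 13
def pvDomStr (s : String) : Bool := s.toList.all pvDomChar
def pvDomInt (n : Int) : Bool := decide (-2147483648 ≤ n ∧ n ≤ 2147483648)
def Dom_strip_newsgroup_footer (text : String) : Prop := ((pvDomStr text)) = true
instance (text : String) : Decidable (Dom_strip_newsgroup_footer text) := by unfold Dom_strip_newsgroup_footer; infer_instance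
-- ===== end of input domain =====

-- B replaces A's backward scan-with-break by a forward last-separator-index pass (return value only; idiomatic decomposition).

-- ===== PORT A =====
-- line.strip().strip('-') == ''
def pvIsSep (line : String) : Bool :=
  PySem.Str.stripChars (PySem.Str.strip line) "-" == ""

-- the 'for line_num in range(len(lines)-1, -1, -1): … break' loop; returns the loop
-- variable at the break, or 0 when the (always nonempty, ending at 0) range is exhausted
def pvFindSepA (lines : List String) : List Int → Int
  | [] => 0
  | i :: rest =>
      if pvIsSep (PySem.List.pyGetD lines i "") then i else pvFindSepA lines rest

def strip_newsgroup_footer (text : String) : String :=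
  let lines := (PySem.Str.split? (PySem.Str.strip text) "\n").getD []
  let line_num := pvFindSepA lines (PySem.List.pyRange ((lines.length : Int) - 1) (-1) (-1))
  if line_num > 0 then
    PySem.Str.join "\n" (PySem.List.slice lines none (some line_num))
  else
    text

-- ===== PORT B =====
def strip_newsgroup_footer_alt (text : String) : String :=
  let lines := (PySem.Str.split? (PySem.Str.strip text) "\n").getD []
  let last_sep := (PySem.List.enumerate lines 0).foldl
      (fun acc p => if pvIsSep p.2 then p.1 else acc) 0
  if last_sep > 0 then
    PySem.Str.join "\n" (PySem.List.slice lines none (some last_sep))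
  else
    text

-- ===== PRECONDITION & SPEC =====
def Spec_strip_newsgroup_footer (text : String) (out : String) : Prop := out = strip_newsgroup_footer_alt text
instance (text : String) (out : String) : Decidable (Spec_strip_newsgroup_footer text out) := by unfold Spec_strip_newsgroup_footer; infer_instance

-- ===== CLAIM (what is proved, stated in full; the proofs are below) =====
def Claim_equal_strip_newsgroup_footer : Prop := ∀ (text : String), Dom_strip_newsgroup_footer text → Spec_strip_newsgroup_footer text (strip_newsgroup_footer text)

-- ===== LEMMAS AND PROOFS =====

-- pvFindSepA only looks at the indices in its list
theorem pvFindSepA_congr (a b : List String) (idxs : List Int)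
    (h : ∀ i ∈ idxs, PySem.List.pyGetD a i "" = PySem.List.pyGetD b i "") :
    pvFindSepA a idxs = pvFindSepA b idxs := by
  induction idxs with
  | nil => rfl
  | cons i rest ih =>
      simp only [pvFindSepA, h i (List.mem_cons_self ..)]
      rw [ih (fun j hj => h j (List.mem_cons_of_mem _ hj))]

-- the core: A's backward break-scan equals B's forward last-index fold
theorem pvFind_eq_fold (lines : List String) :
    pvFindSepA lines (PySem.List.pyRange ((lines.length : Int) - 1) (-1) (-1)) =
      (PySem.List.enumerate lines 0).foldl
        (fun acc p => if pvIsSep p.2 then p.1 else acc) 0 := by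
  induction lines using List.reverseRecOn with
  | nil =>
      rw [PySem.List.pyRange_neg_one_eq_nil (by norm_num)]
      rfl
  | append_singleton ls x ih =>
      have hlen : ((ls ++ [x]).length : Int) - 1 = (ls.length : Int) := by
        simp
      rw [hlen, PySem.List.pyRange_neg_one_cons (by omega)]
      have hx : PySem.List.pyGetD (ls ++ [x]) ((ls.length : Int)) "" = x := by
        rw [PySem.List.pyGetD_eq_getElem _ _ (by omega) (by simp)]
        simp
      have hcongr : pvFindSepA (ls ++ [x])
          (PySem.List.pyRange ((ls.length : Int) - 1) (-1) (-1)) =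
          pvFindSepA ls (PySem.List.pyRange ((ls.length : Int) - 1) (-1) (-1)) := by
        apply pvFindSepA_congr
        intro i hi
        rw [PySem.List.pyRange_neg_one] at hi
        obtain ⟨k, hk, rfl⟩ := List.mem_map.1 hi
        rw [List.mem_range] at hk
        have h0 : (0 : Int) ≤ (ls.length : Int) - 1 - (k : Int) := by omega
        have h1 : (ls.length : Int) - 1 - (k : Int) < (ls.length : Int) := by omega
        rw [PySem.List.pyGetD_eq_getElem _ _ h0 (by simp; omega),
            PySem.List.pyGetD_eq_getElem _ _ h0 h1,
            List.getElem_append_left]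
      rw [pvFindSepA, hx, hcongr, ih, PySem.List.enumerate_append, List.foldl_append]
      by_cases h : pvIsSep x <;>
        simp [PySem.List.enumerate, h]

theorem strip_newsgroup_footer_eq (text : String) :
    strip_newsgroup_footer text = strip_newsgroup_footer_alt text := by
  simp only [strip_newsgroup_footer, strip_newsgroup_footer_alt, pvFind_eq_fold]

-- ===== VERDICT (by name: the statement is the Claim_ definition above) =====
theorem strip_newsgroup_footer_spec : Claim_equal_strip_newsgroup_footer := by
  intro text _
  unfold Spec_strip_newsgroup_footer
  exact strip_newsgroup_footer_eq text
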